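-- pv_equiv track=rewrite | github.com/eungyukm/Python_Algorithm | algorithm/PySolution.py | generate_person_two
-- ===== SOURCE A (Python) =====
-- def generate_person_two(count) -> list:
--     cnt = 0
--     person_two = []
--     number = 1
--     while cnt < count:
--         if cnt % 2 == 0:
--             person_two.append(2)
--         else:
--             person_two.append(number % 5 + 1)
--             number += 1
--
--         cnt += 1
--
--     return person_two
-- ===== SOURCE B (Python) =====
-- # The sequence is periodic with period 10; B produces each element by table
-- # lookup instead of threading parity/number state.
-- _BLOCK = [2, 2, 2, 3, 2, 4, 2, 5, 2, 1]
--
--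
-- def generate_person_two(count) -> list:
--     out = []
--     i = 0
--     while i < count:
--         out.append(_BLOCK[i % 10])
--         i += 1
--     return out
-- ===== Notes on version B (the rewrite author's own statement) =====
-- stated objective: simpler
-- what changed: B replaces A's parity branch plus the separately threaded `number` accumulator with a precomputed period-10 table, emitting element i as _BLOCK[i % 10].
import Mathlib
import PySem

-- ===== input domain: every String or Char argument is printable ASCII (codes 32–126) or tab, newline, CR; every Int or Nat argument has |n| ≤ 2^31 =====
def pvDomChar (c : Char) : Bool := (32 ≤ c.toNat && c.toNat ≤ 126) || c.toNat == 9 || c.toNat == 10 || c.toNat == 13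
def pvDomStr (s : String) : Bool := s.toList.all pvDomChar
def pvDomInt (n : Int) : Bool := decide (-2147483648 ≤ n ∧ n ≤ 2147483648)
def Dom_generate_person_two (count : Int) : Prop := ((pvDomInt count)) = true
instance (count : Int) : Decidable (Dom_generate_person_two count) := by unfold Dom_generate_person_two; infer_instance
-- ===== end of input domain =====

-- B replaces A's parity branch + threaded `number` accumulator with a precomputed
-- period-10 table lookup (objective: simpler).

-- ===== PORT A =====
-- while cnt < count: append 2 on even cnt, else append number % 5 + 1 and bump number
def pvLoopA (count cnt number : Int) (acc : List Int) : List Int :=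
  if _h : cnt < count then
    if PySem.Int.mod cnt 2 = 0 then
      pvLoopA count (cnt + 1) number (acc ++ [2])
    else
      pvLoopA count (cnt + 1) (number + 1) (acc ++ [PySem.Int.mod number 5 + 1])
  else acc
termination_by (count - cnt).toNat
decreasing_by all_goals omega

def generate_person_two (count : Int) : List Int := pvLoopA count 0 1 []

-- ===== PORT B =====
def pvBlock : List Int := [2, 2, 2, 3, 2, 4, 2, 5, 2, 1]

-- _BLOCK[i % 10]: i % 10 ∈ [0,10) and pvBlock has length 10, so the index is
-- always in range and pyGetD is exact here (Python never raises).
def pvLoopB (count i : Int) (acc : List Int) : List Int :=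
  if _h : i < count then
    pvLoopB count (i + 1) (acc ++ [PySem.List.pyGetD pvBlock (PySem.Int.mod i 10) 0])
  else acc
termination_by (count - i).toNat
decreasing_by omega

def generate_person_two_alt (count : Int) : List Int := pvLoopB count 0 []

-- ===== PRECONDITION & SPEC =====
def Spec_generate_person_two (count : Int) (out : List Int) : Prop := out = generate_person_two_alt count
instance (count : Int) (out : List Int) : Decidable (Spec_generate_person_two count out) := by unfold Spec_generate_person_two; infer_instance

-- ===== CLAIM (what is proved, stated in full; the proofs are below) =====
def Claim_equal_generate_person_two : Prop := ∀ (count : Int), Dom_generate_person_two count → Spec_generate_person_two count (generate_person_two count)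

-- ===== LEMMAS AND PROOFS =====

-- the element appended at position cnt is the table entry at cnt % 10
lemma pv_elem_eq (cnt : Int) :
    (if PySem.Int.mod cnt 2 = 0 then (2 : Int)
     else PySem.Int.mod (cnt / 2 + 1) 5 + 1)
      = PySem.List.pyGetD pvBlock (PySem.Int.mod cnt 10) 0 := by
  rw [PySem.Int.mod_eq_emod_of_pos (b := 2) (by omega),
      PySem.Int.mod_eq_emod_of_pos (b := 5) (by omega),
      PySem.Int.mod_eq_emod_of_pos (b := 10) (by omega)]
  have h10 : cnt % 10 = 0 ∨ cnt % 10 = 1 ∨ cnt % 10 = 2 ∨ cnt % 10 = 3 ∨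
      cnt % 10 = 4 ∨ cnt % 10 = 5 ∨ cnt % 10 = 6 ∨ cnt % 10 = 7 ∨
      cnt % 10 = 8 ∨ cnt % 10 = 9 := by omega
  rcases h10 with h10 | h10 | h10 | h10 | h10 | h10 | h10 | h10 | h10 | h10 <;>
    rw [h10] <;>
    first
      | (rw [if_pos (by omega)]; decide)
      | (rw [if_neg (by omega)]
         have h5 : (cnt / 2 + 1) % 5 =
             ((cnt % 10) / 2 + 1) % 5 := by omega
         rw [h5, h10]; decide)

-- loop invariant: A's `number` equals cnt / 2 + 1
lemma pv_loop_eq (count cnt : Int) (acc : List Int) (h : 0 ≤ cnt) :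
    pvLoopA count cnt (cnt / 2 + 1) acc = pvLoopB count cnt acc := by
  by_cases hlt : cnt < count
  · rw [pvLoopA, pvLoopB, dif_pos hlt, dif_pos hlt]
    have he := pv_elem_eq cnt
    by_cases hpar : PySem.Int.mod cnt 2 = 0
    · rw [if_pos hpar]
      rw [if_pos hpar] at he
      rw [← he]
      have hnum : cnt / 2 + 1 = (cnt + 1) / 2 + 1 := by
        rw [PySem.Int.mod_eq_emod_of_pos (b := 2) (by omega)] at hpar; omega
      rw [hnum]
      exact pv_loop_eq count (cnt + 1) _ (by omega)
    · rw [if_neg hpar]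
      rw [if_neg hpar] at he
      rw [← he]
      have hnum : cnt / 2 + 1 + 1 = (cnt + 1) / 2 + 1 := by
        rw [PySem.Int.mod_eq_emod_of_pos (b := 2) (by omega)] at hpar; omega
      rw [hnum]
      exact pv_loop_eq count (cnt + 1) _ (by omega)
  · rw [pvLoopA, pvLoopB, dif_neg hlt, dif_neg hlt]
termination_by (count - cnt).toNat
decreasing_by all_goals omega

-- ===== VERDICT (by name: the statement is the Claim_ definition above) =====
theorem generate_person_two_spec : Claim_equal_generate_person_two := by
  intro count _
  show generate_person_two count = generate_person_two_alt count
  have := pv_loop_eq count 0 [] (by omega)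
  simpa [generate_person_two, generate_person_two_alt] using this
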